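-- pv_equiv track=rewrite | github.com/tjwjy/Model_python | ExReModel/Grid.py | get_simple_grid
-- ===== SOURCE A (Python) =====
-- def get_simple_grid(dimenssionX,dimenssionY,powerlow_args=0):
--     L_Place = []
--     tag = 0
--     for i in range(1, dimenssionX + 1):
--         for j in range(1, dimenssionY + 1):
--             L_Place.append([i, j, tag,1])
--             tag = tag + 1
--     return L_Place
-- ===== SOURCE B (Python) =====
-- def get_simple_grid(dimenssionX, dimenssionY, powerlow_args=0):
--     if dimenssionX <= 0 or dimenssionY <= 0:
--         return []
--     return [[tag // dimenssionY + 1, tag % dimenssionY + 1, tag, 1]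
--             for tag in range(dimenssionX * dimenssionY)]
-- ===== Notes on version B (the rewrite author's own statement) =====
-- stated objective: alternative
-- what changed: Replaces the nested double loop with a running tag counter by a single flat loop over range(dimenssionX*dimenssionY) that reconstructs the coordinates arithmetically as tag//dimenssionY+1 and tag%dimenssionY+1.
import Mathlib
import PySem

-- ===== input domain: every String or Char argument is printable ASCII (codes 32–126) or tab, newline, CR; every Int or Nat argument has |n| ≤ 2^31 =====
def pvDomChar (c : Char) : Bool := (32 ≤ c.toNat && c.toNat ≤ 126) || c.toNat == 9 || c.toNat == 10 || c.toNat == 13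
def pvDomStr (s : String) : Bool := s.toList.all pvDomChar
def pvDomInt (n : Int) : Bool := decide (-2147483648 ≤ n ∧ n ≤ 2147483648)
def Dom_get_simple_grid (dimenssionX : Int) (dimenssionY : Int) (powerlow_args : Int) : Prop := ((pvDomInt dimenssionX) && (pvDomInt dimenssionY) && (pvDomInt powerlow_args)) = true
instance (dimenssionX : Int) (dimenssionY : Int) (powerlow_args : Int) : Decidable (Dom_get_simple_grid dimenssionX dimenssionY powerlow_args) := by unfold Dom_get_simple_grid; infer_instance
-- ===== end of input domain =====

-- B replaces A's nested double loop with running counter by one flat loop over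
-- range(x*y) that recovers the coordinates arithmetically (alternative decomposition, same cost).

-- ===== PORT A =====
def get_simple_grid (dimenssionX : Int) (dimenssionY : Int) (powerlow_args : Int) : List (List Int) :=
  let r := (PySem.List.pyRange 1 (dimenssionX + 1) 1).foldl
    (fun st i =>
      (PySem.List.pyRange 1 (dimenssionY + 1) 1).foldl
        (fun st2 j => (st2.1 ++ [[i, j, st2.2, 1]], st2.2 + 1)) st)
    ([], 0)
  r.1

-- ===== PORT B =====
def get_simple_grid_alt (dimenssionX : Int) (dimenssionY : Int) (powerlow_args : Int) : List (List Int) :=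
  if dimenssionX ≤ 0 ∨ dimenssionY ≤ 0 then []
  else (PySem.List.pyRange 0 (dimenssionX * dimenssionY) 1).map
    (fun tag => [PySem.Int.floordiv tag dimenssionY + 1, PySem.Int.mod tag dimenssionY + 1, tag, 1])

-- ===== PRECONDITION & SPEC =====
def Spec_get_simple_grid (dimenssionX : Int) (dimenssionY : Int) (powerlow_args : Int) (out : List (List Int)) : Prop := out = get_simple_grid_alt dimenssionX dimenssionY powerlow_args
instance (dimenssionX : Int) (dimenssionY : Int) (powerlow_args : Int) (out : List (List Int)) : Decidable (Spec_get_simple_grid dimenssionX dimenssionY powerlow_args out) := by unfold Spec_get_simple_grid; infer_instance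

-- ===== CLAIM (what is proved, stated in full; the proofs are below) =====
def Claim_equal_get_simple_grid : Prop := ∀ (dimenssionX : Int) (dimenssionY : Int) (powerlow_args : Int), Dom_get_simple_grid dimenssionX dimenssionY powerlow_args → Spec_get_simple_grid dimenssionX dimenssionY powerlow_args (get_simple_grid dimenssionX dimenssionY powerlow_args)

-- ===== LEMMAS AND PROOFS =====

-- common closed form: row-major grid of [i+1, j+1, tag, 1]
def pvGrid (x y : Nat) : List (List Int) :=
  (List.range x).flatMap (fun (a : Nat) =>
    (List.range y).map (fun (b : Nat) => [(a : Int) + 1, (b : Int) + 1, (a : Int) * y + b, 1]))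

-- A's inner loop, over a Nat range, with explicit accumulator and tag
theorem pvInner (y : Nat) (i t : Int) (acc : List (List Int)) :
    (List.range y).foldl
      (fun (st2 : List (List Int) × Int) (k : Nat) => (st2.1 ++ [[i, 1 + (k : Int), st2.2, 1]], st2.2 + 1)) (acc, t)
      = (acc ++ (List.range y).map (fun (b : Nat) => [i, (b : Int) + 1, t + b, 1]), t + y) := by
  induction y with
  | zero => simp
  | succ n ih =>
    rw [List.range_succ, List.foldl_append, ih]
    simp only [List.foldl_cons, List.foldl_nil, List.map_append, List.map_cons, List.map_nil,
      List.append_assoc, Prod.mk.injEq]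
    refine ⟨?_, by push_cast; ring⟩
    rw [show 1 + (n : Int) = (n : Int) + 1 from by ring]

-- A's outer loop
theorem pvOuter (x y : Nat) (t : Int) (acc : List (List Int)) :
    (List.range x).foldl
      (fun (st : List (List Int) × Int) (a : Nat) =>
        (List.range y).foldl
          (fun (st2 : List (List Int) × Int) (k : Nat) =>
            (st2.1 ++ [[1 + (a : Int), 1 + (k : Int), st2.2, 1]], st2.2 + 1)) st)
      (acc, t)
      = (acc ++ (List.range x).flatMap (fun (a : Nat) =>
          (List.range y).map (fun (b : Nat) => [(a : Int) + 1, (b : Int) + 1, t + a * y + b, 1])), t + x * y) := by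
  induction x generalizing acc t with
  | zero => simp
  | succ n ih =>
    rw [List.range_succ, List.foldl_append, ih]
    simp only [List.foldl_cons, List.foldl_nil]
    rw [pvInner, List.flatMap_append]
    simp only [List.flatMap_cons, List.flatMap_nil, List.append_nil, List.append_assoc,
      Prod.mk.injEq]
    constructor
    · congr 1
      congr 1
      apply List.map_congr_left
      intro b _
      rw [show 1 + (n : Int) = (n : Int) + 1 from by ring]
    · push_cast; ring

theorem pvA_eq (x y : Nat) (p : Int) :
    get_simple_grid (x : Int) (y : Int) p = pvGrid x y := by
  unfold get_simple_grid
  rw [PySem.List.pyRange_one, PySem.List.pyRange_one]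
  have hx : (((x : Int) + 1) - 1).toNat = x := by omega
  have hy : (((y : Int) + 1) - 1).toNat = y := by omega
  rw [hx, hy]
  simp only [List.foldl_map]
  rw [pvOuter]
  simp only [List.nil_append, zero_add]
  rfl

theorem pvFloordiv (y a b : Nat) (hb : b < y) :
    PySem.Int.floordiv ((a : Int) * y + b) y = a := by
  have hy : (0 : Int) < (y : Int) := by exact_mod_cast Nat.pos_of_ne_zero (by omega)
  rw [PySem.Int.floordiv_eq_ediv_of_pos hy]
  rw [show (a : Int) * y + b = (b : Int) + a * y from by ring,
    Int.add_mul_ediv_right _ _ (by omega : (y : Int) ≠ 0),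
    Int.ediv_eq_zero_of_lt (by positivity) (by exact_mod_cast hb)]
  ring

theorem pvMod (y a b : Nat) (hb : b < y) :
    PySem.Int.mod ((a : Int) * y + b) y = b := by
  have hy : (0 : Int) < (y : Int) := by exact_mod_cast Nat.pos_of_ne_zero (by omega)
  rw [PySem.Int.mod_eq_emod_of_pos hy]
  rw [show (a : Int) * y + b = (b : Int) + a * y from by ring, Int.add_mul_emod_self_right]
  exact Int.emod_eq_of_lt (by positivity) (by exact_mod_cast hb)

theorem pvB_eq (x y : Nat) (hy : 0 < y) :
    (PySem.List.pyRange 0 ((x : Int) * (y : Int)) 1).map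
      (fun tag => [PySem.Int.floordiv tag y + 1, PySem.Int.mod tag y + 1, tag, 1]) = pvGrid x y := by
  have hy' : (0 : Int) < (y : Int) := by exact_mod_cast hy
  induction x with
  | zero => simp [pvGrid, PySem.List.pyRange_one_eq_nil]
  | succ n ih =>
    have hsplit : PySem.List.pyRange 0 (((n + 1 : Nat) : Int) * y) 1
        = PySem.List.pyRange 0 ((n : Int) * y) 1
          ++ PySem.List.pyRange ((n : Int) * y) (((n + 1 : Nat) : Int) * y) 1 := by
      apply PySem.List.pyRange_one_append
      · positivity
      · push_cast; nlinarith [hy'.le]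
    rw [hsplit, List.map_append, ih]
    unfold pvGrid
    rw [List.range_succ, List.flatMap_append]
    congr 1
    simp only [List.flatMap_cons, List.flatMap_nil, List.append_nil]
    rw [PySem.List.pyRange_one]
    have hlen : ((((n + 1 : Nat) : Int) * y) - (n : Int) * y).toNat = y := by
      rw [show (((n + 1 : Nat) : Int) * y) - (n : Int) * y = (y : Int) from by push_cast; ring]
      omega
    rw [hlen, List.map_map]
    apply List.map_congr_left
    intro b hb
    simp only [List.mem_range] at hb
    simp only [Function.comp_apply]
    rw [pvFloordiv y n b hb, pvMod y n b hb]

-- ===== VERDICT (by name: the statement is the Claim_ definition above) =====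
theorem get_simple_grid_spec : Claim_equal_get_simple_grid := by
  intro X Y p _
  unfold Spec_get_simple_grid get_simple_grid_alt
  by_cases h : X ≤ 0 ∨ Y ≤ 0
  · rw [if_pos h]
    unfold get_simple_grid
    rcases h with h | h
    · rw [PySem.List.pyRange_one_eq_nil (a := 1) (b := X + 1) (by omega)]
      rfl
    · rw [PySem.List.pyRange_one_eq_nil (a := 1) (b := Y + 1) (by omega)]
      simp
  · rw [if_neg h]
    rcases not_or.mp h with ⟨hx, hy⟩
    have hX : X = ((X.toNat : Nat) : Int) := by omega
    have hY : Y = ((Y.toNat : Nat) : Int) := by omega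
    rw [hX, hY, pvA_eq, ← pvB_eq X.toNat Y.toNat (by omega)]
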